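-- pv_equiv track=rewrite | github.com/OrcoAgustin/algoritmos-1 | guia7.py | sacaVocal
-- ===== SOURCE A (Python) =====
-- def sacaVocal(lista:[str])->[str]:
--     i=0
--     while i <len(lista) :
--         if lista[i]=="a" or lista[i]=="e" or lista[i]=="i" or lista[i]=="o" or lista[i]=="u" or lista[i]=="A" or lista[i]=="E" or lista[i]=="I" or lista[i]=="O" or lista[i]=="U":
--             lista.pop(i)
--         else:
--             i+=1
--     return lista
-- ===== SOURCE B (Python) =====
-- def sacaVocal(lista):
--     # two-pointer in-place compaction; mutates lista like A and returns the same object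
--     write = 0
--     for read in range(len(lista)):
--         x = lista[read]
--         if x not in ("a", "e", "i", "o", "u", "A", "E", "I", "O", "U"):
--             lista[write] = x
--             write += 1
--     del lista[write:]
--     return lista
-- ===== Notes on version B (the rewrite author's own statement) =====
-- stated objective: faster
-- what changed: Replaces the while-loop that pops each vowel from the list (shifting the tail each time) with a single-pass two-pointer in-place compaction followed by one tail truncation.
import Mathlib
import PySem

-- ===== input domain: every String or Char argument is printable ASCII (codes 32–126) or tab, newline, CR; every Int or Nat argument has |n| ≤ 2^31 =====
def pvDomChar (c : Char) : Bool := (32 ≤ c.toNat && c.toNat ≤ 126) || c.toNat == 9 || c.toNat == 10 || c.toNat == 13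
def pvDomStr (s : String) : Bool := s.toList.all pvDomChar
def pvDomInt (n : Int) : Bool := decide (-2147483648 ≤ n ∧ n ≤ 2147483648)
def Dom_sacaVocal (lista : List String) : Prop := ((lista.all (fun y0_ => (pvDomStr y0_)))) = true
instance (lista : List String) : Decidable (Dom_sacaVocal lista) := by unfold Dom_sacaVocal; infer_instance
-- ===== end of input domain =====

-- B replaces A's quadratic pop-per-vowel while-loop by a one-pass two-pointer
-- in-place compaction (objective: faster); the equivalence proved is about the
-- returned value (both Pythons mutate `lista` identically and return it).
-- ===== PORT A =====
-- the or-chain of equality tests of A, in the same order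
def pvIsVowel (x : String) : Bool :=
  x == "a" || x == "e" || x == "i" || x == "o" || x == "u" ||
  x == "A" || x == "E" || x == "I" || x == "O" || x == "U"

-- the while loop: if lista[i] is a vowel, pop it at i; else i += 1
def pvLoopA (lista : List String) (i : Nat) : List String :=
  if h : i < lista.length then
    if pvIsVowel lista[i] then pvLoopA (lista.eraseIdx i) i
    else pvLoopA lista (i + 1)
  else lista
termination_by lista.length - i
decreasing_by
  · simp [List.length_eraseIdx, h]; omega
  · omega

def sacaVocal (lista : List String) : List String := pvLoopA lista 0

-- ===== PORT B =====
-- the for-loop over range(len(lista)): state is (mutated list, write index)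
def pvLoopB (l : List String) (write read n : Nat) : List String × Nat :=
  if read < n then
    let x := l.getD read ""
    if pvIsVowel x then pvLoopB l write (read + 1) n
    else pvLoopB (l.set write x) (write + 1) (read + 1) n
  else (l, write)
termination_by n - read

-- del lista[write:]  =  take write
def sacaVocal_alt (lista : List String) : List String :=
  let r := pvLoopB lista 0 0 lista.length
  r.1.take r.2

-- ===== PRECONDITION & SPEC =====
def Spec_sacaVocal (lista : List String) (out : List String) : Prop := out = sacaVocal_alt lista
instance (lista : List String) (out : List String) : Decidable (Spec_sacaVocal lista out) := by unfold Spec_sacaVocal; infer_instance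

-- ===== CLAIM (what is proved, stated in full; the proofs are below) =====
def Claim_equal_sacaVocal : Prop := ∀ (lista : List String), Dom_sacaVocal lista → Spec_sacaVocal lista (sacaVocal lista)

-- ===== LEMMAS AND PROOFS =====

-- ===== VERDICT (by name: the statement is the Claim_ definition above) =====
-- Both ports compute the in-order filter of the non-vowel strings.
theorem pvLoopA_eq (lista : List String) (i : Nat) :
    pvLoopA lista i = lista.take i ++ (lista.drop i).filter (fun x => !pvIsVowel x) := by
  fun_induction pvLoopA lista i with
  | case1 lista i h hv ih =>
      rw [ih, List.eraseIdx_eq_take_drop_succ]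
      have hlen : (List.take i lista).length = i := by rw [List.length_take]; omega
      rw [List.take_append, List.drop_append, hlen, Nat.sub_self, List.take_take,
        List.drop_of_length_le hlen.le]
      conv_rhs => rw [List.drop_eq_getElem_cons h]
      rw [List.filter_cons, if_neg (by simp [hv])]
      simp
  | case2 lista i h hv ih =>
      rw [ih]
      rw [List.take_succ, List.getElem?_eq_getElem h]
      conv_rhs => rw [List.drop_eq_getElem_cons h]
      rw [List.filter_cons, if_pos (by simp [hv]), Option.toList_some, List.append_assoc, List.singleton_append]
  | case3 lista i h =>
      have hle : lista.length ≤ i := by omega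
      simp [List.take_of_length_le hle, List.drop_of_length_le hle]

theorem pvLoopB_eq (lista : List String) (l : List String) (write read : Nat)
    (hlen : l.length = lista.length) (hwr : write ≤ read) (hrn : read ≤ lista.length)
    (hdrop : l.drop read = lista.drop read)
    (htake : l.take write = (lista.take read).filter (fun x => !pvIsVowel x)) :
    (pvLoopB l write read lista.length).1.take (pvLoopB l write read lista.length).2
      = lista.filter (fun x => !pvIsVowel x) := by
  unfold pvLoopB
  by_cases h : read < lista.length
  · have hrl : read < l.length := by omega
    have hdc := List.drop_eq_getElem_cons hrl
    have hdc' := List.drop_eq_getElem_cons h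
    rw [hdc, hdc'] at hdrop
    have hx : l[read] = lista[read] := (List.cons.injEq _ _ _ _ ▸ hdrop).1
    have hdrop' : l.drop (read + 1) = lista.drop (read + 1) :=
      (List.cons.injEq _ _ _ _ ▸ hdrop).2
    have hgd : l.getD read "" = lista[read] := by
      rw [List.getD_eq_getElem l "" hrl, hx]
    by_cases hv : pvIsVowel lista[read] = true
    · rw [if_pos h, if_pos (by rw [hgd]; exact hv)]
      refine pvLoopB_eq lista l write (read + 1) hlen (by omega) (by omega) hdrop' ?_
      rw [List.take_succ, List.getElem?_eq_getElem h, List.filter_append, htake]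
      simp [List.filter_cons, hv]
    · rw [if_pos h, if_neg (by rw [hgd]; exact hv)]
      refine pvLoopB_eq lista (l.set write (l.getD read "")) (write + 1) (read + 1)
        (by rw [List.length_set]; exact hlen) (by omega) (by omega) ?_ ?_
      · rw [List.drop_set, if_pos (by omega)]; exact hdrop'
      · have hwl : write < l.length := by omega
        have hfl : ((lista.take read).filter (fun x => !pvIsVowel x)).length = write := by
          rw [← htake, List.length_take]; omega
        rw [List.take_set, List.take_succ, List.getElem?_eq_getElem hwl, Option.toList_some,
          htake, List.set_append, if_neg (by rw [hfl]; omega), hfl, Nat.sub_self,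
          List.take_succ, List.getElem?_eq_getElem h, Option.toList_some, List.filter_append]
        simp [hv, List.getElem?_eq_getElem hrl, hx]
  · rw [if_neg h]
    have hre : read = lista.length := by omega
    rw [htake, hre, List.take_length]
termination_by lista.length - read

theorem sacaVocal_spec : Claim_equal_sacaVocal := by
  intro lista _
  unfold Spec_sacaVocal sacaVocal sacaVocal_alt
  rw [pvLoopA_eq, pvLoopB_eq lista lista 0 0 rfl (Nat.le_refl 0) (Nat.zero_le _) rfl rfl]
  simp
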